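-- pv_equiv track=rewrite | github.com/Bob-slash/Speech-Error-Analysis | AutoAnalysis.py | find_long
-- ===== SOURCE A (Python) =====
-- def find_long(durationList):
--
--     longest = {}
--
--     for duration in durationList:
--         word = duration[0]
--         length = duration[1]
--
--         if word not in longest.keys():
--             longest[word] = length
--
--         elif word in longest.keys():
--             if longest[word] < length:
--                 longest[word] = length
--
--     return longest
-- ===== SOURCE B (Python) =====
-- def find_long(durationList):
--     # Two-phase: gather every length per word (first-appearance key order),
--     # then reduce each group with max.
--     groups = {}
--     for word, length in durationList:
--         groups.setdefault(word, []).append(length)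
--     return {word: max(lengths) for word, lengths in groups.items()}
-- ===== Notes on version B (the rewrite author's own statement) =====
-- stated objective: alternative
-- what changed: Replaces the running membership-guarded maximum with two explicit phases: group all lengths per word into a dict of lists, then reduce each group with max.
import Mathlib
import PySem

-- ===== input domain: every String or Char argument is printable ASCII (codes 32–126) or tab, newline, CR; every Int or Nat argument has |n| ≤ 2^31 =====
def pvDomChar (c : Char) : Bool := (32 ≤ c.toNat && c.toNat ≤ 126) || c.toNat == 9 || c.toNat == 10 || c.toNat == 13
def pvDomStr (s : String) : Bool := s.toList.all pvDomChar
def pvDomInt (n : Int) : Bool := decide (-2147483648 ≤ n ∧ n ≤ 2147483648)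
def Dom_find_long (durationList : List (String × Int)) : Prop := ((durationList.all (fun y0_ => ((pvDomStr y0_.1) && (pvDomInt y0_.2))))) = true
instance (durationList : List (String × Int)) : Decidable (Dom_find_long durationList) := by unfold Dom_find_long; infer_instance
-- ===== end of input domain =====

-- B replaces A's membership-guarded running maximum by two explicit phases (group all lengths per word, then reduce each group with max); alternative decomposition, same cost.

-- ===== PORT A =====
-- loop body of A; 'longest[word]' is read only when the key is present, ported as getD with unreachable default 0
def find_long_step (longest : PySem.Dict String Int) (duration : String × Int) : PySem.Dict String Int :=
  let word := duration.1
  let length := duration.2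
  if ¬ (longest.contains word) then longest.insert word length
  else if longest.contains word then
    (if longest.getD word 0 < length then longest.insert word length else longest)
  else longest

def find_long (durationList : List (String × Int)) : List (String × Int) :=
  (durationList.foldl find_long_step PySem.Dict.empty).items

-- ===== PORT B =====
-- max(ls); every group B applies it to is nonempty, so the default 0 is unreachable
def pymax (ls : List Int) : Int := (PySem.List.max? ls (fun x => x)).getD 0

-- loop body of B's grouping phase: groups.setdefault(word, []).append(length)
def find_long_group (g : PySem.Dict String (List Int)) (p : String × Int) : PySem.Dict String (List Int) :=
  g.modify p.1 [] (fun ls => ls ++ [p.2])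

def find_long_alt (durationList : List (String × Int)) : List (String × Int) :=
  let groups := durationList.foldl find_long_group PySem.Dict.empty
  groups.items.map (fun p => (p.1, pymax p.2))

-- ===== PRECONDITION & SPEC =====
def Spec_find_long (durationList : List (String × Int)) (out : List (String × Int)) : Prop := out = find_long_alt durationList
instance (durationList : List (String × Int)) (out : List (String × Int)) : Decidable (Spec_find_long durationList out) := by unfold Spec_find_long; infer_instance

-- ===== CLAIM (what is proved, stated in full; the proofs are below) =====
def Claim_equal_find_long : Prop := ∀ (durationList : List (String × Int)), Dom_find_long durationList → Spec_find_long durationList (find_long durationList)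

-- ===== LEMMAS AND PROOFS =====

theorem pymax_singleton (x : Int) : pymax [x] = x := by
  simp [pymax, PySem.List.max?]

theorem max?_cons_foldl (ys : List Int) : ∀ y : Int,
    PySem.List.max? (y :: ys) (fun x => x)
      = some (ys.foldl (fun m x => if m < x then x else m) y) := by
  induction ys with
  | nil => intro y; simp [PySem.List.max?]
  | cons x xs ih =>
      intro y
      have h := ih (if y < x then x else y)
      simp [PySem.List.max?] at h ⊢
      rw [apply_ite some] at h
      exact h

theorem pymax_append (ls : List Int) (h : ls ≠ []) (x : Int) :
    pymax (ls ++ [x]) = if pymax ls < x then x else pymax ls := by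
  cases ls with
  | nil => exact absurd rfl h
  | cons y ys =>
      simp only [pymax, List.cons_append, max?_cons_foldl, List.foldl_append,
        List.foldl_cons, List.foldl_nil, Option.getD_some]

theorem find_long_inv (l : List (String × Int)) :
    ∀ (dG : PySem.Dict String (List Int)) (dA : PySem.Dict String Int),
    dA.items = dG.items.map (fun p => (p.1, pymax p.2)) →
    dG.keys.Nodup → (∀ p ∈ dG.items, p.2 ≠ []) →
    (l.foldl find_long_step dA).items
      = ((l.foldl find_long_group dG).items).map (fun p => (p.1, pymax p.2)) := by
  induction l with
  | nil => intro dG dA hit hnd hv; simpa using hit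
  | cons p rest ih =>
      intro dG dA hit hnd hv
      obtain ⟨w, len⟩ := p
      simp only [List.foldl_cons]
      have hc : dA.contains w = dG.contains w := by
        simp only [PySem.Dict.contains, hit, List.any_map]; rfl
      have hG : find_long_group dG (w, len) = dG.insert w ((dG.getD w []) ++ [len]) := rfl
      have hndG : (find_long_group dG (w, len)).keys.Nodup := by
        rw [hG]; exact PySem.Dict.nodup_keys_insert dG w _ hnd
      by_cases h : dG.contains w = true
      · -- key already present
        obtain ⟨ls, hls⟩ : ∃ ls, dG.get? w = some ls := by
          have := PySem.Dict.contains_eq_isSome_get? dG w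
          rw [h] at this
          exact Option.isSome_iff_exists.mp this.symm
        obtain ⟨q, hq, hq2⟩ : ∃ q, List.find? (fun r => r.1 == w) dG.items = some q ∧ q.2 = ls := by
          simpa [PySem.Dict.get?, Option.map_eq_some_iff] using hls
        have hqmem : q ∈ dG.items := List.mem_of_find?_eq_some hq
        have hlsne : ls ≠ [] := hq2 ▸ hv q hqmem
        have hfind : List.find? (fun r => r.1 == w) dA.items
            = (List.find? (fun r => r.1 == w) dG.items).map (fun p => (p.1, pymax p.2)) := by
          rw [hit, List.find?_map]; rfl
        have hgd : dA.getD w 0 = pymax ls := by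
          simp [PySem.Dict.getD, PySem.Dict.get?, hfind, hq, hq2]
        have hgdG : dG.getD w [] = ls := by
          simp [PySem.Dict.getD, hls]
        -- the (unique) entry for w in dG.items carries the value ls
        have huniq : ∀ r ∈ dG.items, r.1 = w → r.2 = ls := by
          intro r hr hrw
          have h1 : dG.get? r.1 = some r.2 :=
            PySem.Dict.get?_of_mem_items dG (by simpa using hr) hnd
          rw [hrw, hls] at h1
          exact (Option.some.inj h1).symm
        have hstepG : (find_long_group dG (w, len)).items
            = dG.items.map (fun r => if r.1 == w then (w, ls ++ [len]) else r) := by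
          rw [hG, hgdG]
          exact PySem.Dict.items_insert_of_contains dG _ h
        have hvG : ∀ r ∈ (find_long_group dG (w, len)).items, r.2 ≠ [] := by
          intro r hr
          rw [hG] at hr
          rcases (PySem.Dict.mem_items_insert dG w _ r).mp hr with hre | ⟨hrm, _⟩
          · rw [hre]; simp
          · exact hv r hrm
        by_cases hlt : dA.getD w 0 < len
        · -- update to len
          have hstepA : find_long_step dA (w, len) = dA.insert w len := by
            simp [find_long_step, hc, h, hlt]
          rw [hstepA]
          refine ih _ _ ?_ hndG hvG
          rw [PySem.Dict.items_insert_of_contains dA len (hc.trans h), hstepG, hit,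
            List.map_map, List.map_map]
          apply List.map_congr_left
          intro r hr
          rw [hgd] at hlt
          by_cases hrw : r.1 = w
          · simp [Function.comp, hrw, pymax_append ls hlsne len, hlt]
          · simp [Function.comp, hrw]
        · -- keep old value
          have hstepA : find_long_step dA (w, len) = dA := by
            simp [find_long_step, hc, h, hlt]
          rw [hstepA]
          refine ih _ _ ?_ hndG hvG
          rw [hstepG, hit, List.map_map]
          apply List.map_congr_left
          intro r hr
          rw [hgd] at hlt
          by_cases hrw : r.1 = w
          · have hr2 : r.2 = ls := huniq r hr hrw
            simp [Function.comp, hrw, hr2, pymax_append ls hlsne len, hlt]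
          · simp [Function.comp, hrw]
      · -- fresh key: both sides append
        have h' : dG.contains w = false := by simpa using h
        have hstepA : find_long_step dA (w, len) = dA.insert w len := by
          simp [find_long_step, hc, h']
        have hgdG : dG.getD w [] = [] := PySem.Dict.getD_of_not_contains dG [] h'
        have hvG : ∀ r ∈ (find_long_group dG (w, len)).items, r.2 ≠ [] := by
          intro r hr
          rw [hG] at hr
          rcases (PySem.Dict.mem_items_insert dG w _ r).mp hr with hre | ⟨hrm, _⟩
          · rw [hre]; simp
          · exact hv r hrm
        rw [hstepA]
        refine ih _ _ ?_ hndG hvG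
        rw [PySem.Dict.items_insert_of_not_contains dA len (hc.trans h'), hG, hgdG,
          PySem.Dict.items_insert_of_not_contains dG _ h', hit]
        simp [pymax_singleton]

-- ===== VERDICT (by name: the statement is the Claim_ definition above) =====
theorem find_long_spec : Claim_equal_find_long := by
  intro l _
  unfold Spec_find_long find_long find_long_alt
  refine find_long_inv l PySem.Dict.empty PySem.Dict.empty rfl PySem.Dict.nodup_keys_empty ?_
  intro p hp
  simp [PySem.Dict.empty] at hp
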